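-- pv_equiv track=rewrite | github.com/hroest/wikispell | wikispell/textrange_parser.py | hyperlink_range
-- ===== SOURCE A (Python) =====
-- def hyperlink_range(text):
--     tRange =  [];
--     loc = 0
--     # Find all occurences of http(s)// and then append everything except spaces
--     # or newlines.
--     while True:
--         s = text.find('https://', loc)
--         s2 = text.find('http://', loc)
--         if s ==-1 and s2 == -1: break
--         if not s == -1:
--             if not s2 == -1:
--                 if s < s2: first = s
--                 else: first = s2
--             else: first = s
--         else: first = s2
--         second = first
--         while second < len(text) and not (text[second] == ' ' or text[second] == '\n'):
--             second += 1
--         tRange.append([first, second])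
--         loc = second
--     return tRange
-- ===== SOURCE B (Python) =====
-- def hyperlink_range(text):
--     res = []
--     i, n = 0, len(text)
--     while i < n:
--         if text.startswith(('http://', 'https://'), i):
--             j = i
--             while j < n and text[j] not in ' \n':
--                 j += 1
--             res.append([i, j])
--             i = j
--         else:
--             i += 1
--     return res
-- ===== Notes on version B (the rewrite author's own statement) =====
-- stated objective: simpler
-- what changed: Replaces the find/find/min-of-two-branches outer loop with a single left-to-right index scan that tests startswith(('http://','https://'), i) at each position and jumps past each matched URL.
import Mathlib
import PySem

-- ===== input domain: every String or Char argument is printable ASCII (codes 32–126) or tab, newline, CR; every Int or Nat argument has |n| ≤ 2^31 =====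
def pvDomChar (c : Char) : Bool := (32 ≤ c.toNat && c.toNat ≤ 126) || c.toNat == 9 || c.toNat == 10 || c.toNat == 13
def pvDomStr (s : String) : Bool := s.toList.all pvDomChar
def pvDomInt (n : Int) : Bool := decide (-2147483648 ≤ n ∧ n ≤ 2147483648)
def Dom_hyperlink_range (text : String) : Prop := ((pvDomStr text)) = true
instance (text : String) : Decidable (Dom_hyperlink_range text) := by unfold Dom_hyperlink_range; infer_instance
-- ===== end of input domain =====

-- B replaces A's find/find/min-of-two outer loop by one left-to-right index scan (simpler); return values proved equal on all inputs.

-- ===== PORT A =====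

-- inner 'while second < len(text) and not (text[second] == ' ' or text[second] == '\n')'
def aInner (cs : List Char) (k : Nat) : Nat :=
  if h : k < cs.length then
    if cs[k] = ' ' ∨ cs[k] = '\n' then k else aInner cs (k + 1)
  else k
termination_by cs.length - k

-- the nested-if selection of 'first' from the two find results
def aFirst (cs : List Char) (loc : Nat) : Int :=
  let s := PySem.Chars.findFrom cs "https://".toList (loc : Int) none
  let s2 := PySem.Chars.findFrom cs "http://".toList (loc : Int) none
  if ¬ s = -1 then (if ¬ s2 = -1 then (if s < s2 then s else s2) else s) else s2

lemma le_aInner (cs : List Char) (k : Nat) : k ≤ aInner cs k := by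
  fun_induction aInner cs k with
  | case1 => omega
  | case2 _ _ _ ih => omega
  | case3 => omega

lemma aInner_le (cs : List Char) (k : Nat) (h : k ≤ cs.length) : aInner cs k ≤ cs.length := by
  fun_induction aInner cs k with
  | case1 => omega
  | case2 _ _ _ ih => exact ih (by omega)
  | case3 => omega

lemma aInner_gt (cs : List Char) (k : Nat) (hk : k < cs.length)
    (hc : ¬ (cs[k] = ' ' ∨ cs[k] = '\n')) : k < aInner cs k := by
  have h1 : aInner cs k = aInner cs (k + 1) := by
    rw [aInner]; simp [hk, hc]
  have := le_aInner cs (k + 1)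
  omega

-- at i the text carries one of the two URL prefixes (proof-side predicate used by the
-- step lemmas; both ports' guards are characterised through it)
def PA (cs : List Char) (i : Nat) : Prop :=
  (['h','t','t','p',':','/','/'] <+: cs.drop i) ∨ (['h','t','t','p','s',':','/','/'] <+: cs.drop i)

lemma PA_lt (cs : List Char) (i : Nat) (h : PA cs i) : i < cs.length := by
  rcases h with h | h <;>
  · have := h.length_le
    simp at this
    omega

lemma PA_head (cs : List Char) (i : Nat) (h : PA cs i) (hlt : i < cs.length) :
    cs[i] = 'h' := by
  have hg : cs.drop i = cs[i] :: cs.drop (i + 1) := List.drop_eq_getElem_cons hlt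
  rcases h with h | h <;>
  · rw [hg] at h
    rcases h with ⟨t, ht⟩
    simp only [List.cons_append, List.cons.injEq] at ht
    exact ht.1.symm

-- findFrom characterisation of aFirst: the selected 'first' is the least i ≥ loc with PA
lemma findFrom_none_iff (cs sub : List Char) (loc : Nat) (h : loc ≤ cs.length) :
    PySem.Chars.findFrom cs sub (loc : Int) none = -1 ↔ ∀ i, loc ≤ i → ¬ sub <+: cs.drop i := by
  rw [PySem.Chars.findFrom_natCast_eq_neg_one_iff cs sub loc h]
  constructor
  · intro hinf i hi hpre
    apply hinf
    rw [← PySem.Chars.isIn_iff_infix, ← PySem.Chars.exists_prefix_drop_iff_isIn]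
    have e : loc + (i - loc) = i := by omega
    exact ⟨i - loc, by rwa [List.drop_drop, e]⟩
  · intro hall hinf
    rw [← PySem.Chars.isIn_iff_infix, ← PySem.Chars.exists_prefix_drop_iff_isIn] at hinf
    rcases hinf with ⟨j, hj⟩
    rw [List.drop_drop] at hj
    exact hall (loc + j) (by omega) hj

lemma findFrom_some_spec (cs sub : List Char) (loc : Nat) (h : loc ≤ cs.length)
    (hne : PySem.Chars.findFrom cs sub (loc : Int) none ≠ -1) :
    ∃ m : Nat, PySem.Chars.findFrom cs sub (loc : Int) none = (m : Int) ∧ loc ≤ m ∧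
      sub <+: cs.drop m ∧ ∀ i, loc ≤ i → i < m → ¬ sub <+: cs.drop i := by
  obtain ⟨h1, h2, h3⟩ := PySem.Chars.findFrom_natCast_spec cs sub loc h hne
  refine ⟨(PySem.Chars.findFrom cs sub (loc : Int) none).toNat, ?_, ?_, h2, h3⟩
  · omega
  · omega

lemma aFirst_spec (cs : List Char) (loc : Nat) (h : loc ≤ cs.length)
    (hs : ¬ (PySem.Chars.findFrom cs ['h','t','t','p','s',':','/','/'] (loc : Int) none = -1 ∧
             PySem.Chars.findFrom cs ['h','t','t','p',':','/','/'] (loc : Int) none = -1)) :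
    ∃ m : Nat, aFirst cs loc = (m : Int) ∧ loc ≤ m ∧ PA cs m ∧
      ∀ i, loc ≤ i → i < m → ¬ PA cs i := by
  unfold aFirst PA
  by_cases h1 : PySem.Chars.findFrom cs ['h','t','t','p','s',':','/','/'] (loc : Int) none = -1
  · have h2 : ¬ PySem.Chars.findFrom cs ['h','t','t','p',':','/','/'] (loc : Int) none = -1 := by tauto
    obtain ⟨m, hm, hlm, hpre, hmin⟩ := findFrom_some_spec cs _ loc h h2
    have hnone := (findFrom_none_iff cs ['h','t','t','p','s',':','/','/'] loc h).mp h1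
    refine ⟨m, by simp [h1, hm], hlm, Or.inl hpre, ?_⟩
    intro i hi him hPA
    rcases hPA with hp | hp
    · exact hmin i hi him hp
    · exact hnone i hi hp
  · obtain ⟨m, hm, hlm, hpre, hmin⟩ := findFrom_some_spec cs _ loc h h1
    by_cases h2 : PySem.Chars.findFrom cs ['h','t','t','p',':','/','/'] (loc : Int) none = -1
    · have hnone := (findFrom_none_iff cs ['h','t','t','p',':','/','/'] loc h).mp h2
      refine ⟨m, by simp [h2, hm], hlm, Or.inr hpre, ?_⟩
      intro i hi him hPA
      rcases hPA with hp | hp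
      · exact hnone i hi hp
      · exact hmin i hi him hp
    · obtain ⟨m2, hm2, hlm2, hpre2, hmin2⟩ := findFrom_some_spec cs _ loc h h2
      by_cases hlt : m < m2
      · have hc : (m : Int) < (m2 : Int) := by exact_mod_cast hlt
        refine ⟨m, by simp [hm, hm2, hc], hlm, Or.inr hpre, ?_⟩
        intro i hi him hPA
        rcases hPA with hp | hp
        · exact hmin2 i hi (by omega) hp
        · exact hmin i hi him hp
      · have hc : ¬ (m : Int) < (m2 : Int) := by exact_mod_cast hlt
        refine ⟨m2, by simp [hm, hm2, hc], hlm2, Or.inl hpre2, ?_⟩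
        intro i hi him hPA
        rcases hPA with hp | hp
        · exact hmin2 i hi him hp
        · exact hmin i hi (by omega) hp

lemma aStep_bounds (cs : List Char) (loc : Nat) (h : loc ≤ cs.length)
    (hs : ¬ (PySem.Chars.findFrom cs "https://".toList (loc : Int) none = -1 ∧
             PySem.Chars.findFrom cs "http://".toList (loc : Int) none = -1)) :
    loc < aInner cs (aFirst cs loc).toNat ∧ aInner cs (aFirst cs loc).toNat ≤ cs.length := by
  obtain ⟨m, hm, hlm, hPA, _⟩ := aFirst_spec cs loc h hs
  have hmn : m < cs.length := PA_lt cs m hPA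
  have hh : cs[m] = 'h' := PA_head cs m hPA hmn
  have hgt : m < aInner cs m := aInner_gt cs m hmn (by simp [hh])
  have hle : aInner cs m ≤ cs.length := aInner_le cs m (by omega)
  rw [hm]
  simpa using ⟨by omega, hle⟩

-- the 'while True' outer loop; h is the totality invariant loc ≤ len(text)
def aLoop (cs : List Char) (loc : Nat) (h : loc ≤ cs.length) (acc : List (List Int)) :
    List (List Int) :=
  if hs : PySem.Chars.findFrom cs "https://".toList (loc : Int) none = -1 ∧
          PySem.Chars.findFrom cs "http://".toList (loc : Int) none = -1 then acc
  else
    let first := aFirst cs loc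
    let second := aInner cs first.toNat
    aLoop cs second (aStep_bounds cs loc h hs).2 (acc ++ [[first, (second : Int)]])
termination_by cs.length - loc
decreasing_by
  have := (aStep_bounds cs loc h hs).1
  have := (aStep_bounds cs loc h hs).2
  omega

def hyperlink_range (text : String) : List (List Int) :=
  aLoop text.toList 0 (by omega) []

-- ===== PORT B =====

-- inner 'while j < n and text[j] not in ' \n''
def bExtend (cs : List Char) (j : Nat) : Nat :=
  if h : j < cs.length then
    if cs[j] ∈ [' ', '\n'] then j else bExtend cs (j + 1)
  else j
termination_by cs.length - j

lemma bExtend_eq_aInner (cs : List Char) (j : Nat) : bExtend cs j = aInner cs j := by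
  fun_induction bExtend cs j with
  | case1 h hc => unfold aInner; simp_all
  | case2 h hc ih => unfold aInner; simp_all
  | case3 h => unfold aInner; simp_all

lemma bExtend_gt (cs : List Char) (j : Nat) (hj : j < cs.length) (hh : cs[j] = 'h') :
    j < bExtend cs j := by
  rw [bExtend_eq_aInner]
  exact aInner_gt cs j hj (by simp [hh])

-- the single scan 'while i < n'
def bLoop (cs : List Char) (i : Nat) : List (List Int) :=
  if h : i < cs.length then
    if hp : "http://".toList.isPrefixOf (cs.drop i) || "https://".toList.isPrefixOf (cs.drop i) then
      let j := bExtend cs i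
      have hj : i < j := by
        apply bExtend_gt cs i h
        apply PA_head cs i _ h
        unfold PA
        simp only [Bool.or_eq_true, List.isPrefixOf_iff_prefix] at hp
        exact hp
      [(i : Int), (j : Int)] :: bLoop cs j
    else bLoop cs (i + 1)
  else []
termination_by cs.length - i
decreasing_by
  · omega
  · omega

def hyperlink_range_alt (text : String) : List (List Int) :=
  bLoop text.toList 0

-- ===== PRECONDITION & SPEC =====
def Spec_hyperlink_range (text : String) (out : List (List Int)) : Prop := out = hyperlink_range_alt text
instance (text : String) (out : List (List Int)) : Decidable (Spec_hyperlink_range text out) := by unfold Spec_hyperlink_range; infer_instance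

-- ===== CLAIM (what is proved, stated in full; the proofs are below) =====
def Claim_equal_hyperlink_range : Prop := ∀ (text : String), Dom_hyperlink_range text → Spec_hyperlink_range text (hyperlink_range text)

-- ===== LEMMAS AND PROOFS =====

lemma bLoop_guard_iff (cs : List Char) (i : Nat) :
    ("http://".toList.isPrefixOf (cs.drop i) || "https://".toList.isPrefixOf (cs.drop i)) = true
      ↔ PA cs i := by
  unfold PA
  simp only [Bool.or_eq_true, List.isPrefixOf_iff_prefix,
    show "https://".toList = ['h','t','t','p','s',':','/','/'] from rfl,
    show "http://".toList = ['h','t','t','p',':','/','/'] from rfl]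

lemma bLoop_skip_to (cs : List Char) (i m : Nat) (him : i ≤ m) (hm : m ≤ cs.length)
    (hno : ∀ i', i ≤ i' → i' < m → ¬ PA cs i') : bLoop cs i = bLoop cs m := by
  obtain ⟨d, hd⟩ : ∃ d, m = i + d := ⟨m - i, by omega⟩
  subst hd
  induction d generalizing i with
  | zero => rfl
  | succ d ih =>
    have hi : i < cs.length := by omega
    have hnoi : ¬ PA cs i := hno i (le_refl i) (by omega)
    rw [bLoop]
    simp only [hi, dif_pos]
    rw [dif_neg (by rw [bLoop_guard_iff]; exact hnoi)]
    have e : i + (d + 1) = i + 1 + d := by omega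
    rw [e] at *
    exact ih (i + 1) (by omega) (by omega) (fun i' h1 h2 => hno i' (by omega) (by omega))

lemma bLoop_none (cs : List Char) (i : Nat) (hno : ∀ i', i ≤ i' → ¬ PA cs i') :
    bLoop cs i = [] := by
  by_cases h : i ≤ cs.length
  · rw [bLoop_skip_to cs i cs.length h (le_refl _) (fun i' h1 h2 => hno i' h1)]
    rw [bLoop]
    simp
  · rw [bLoop]
    simp
    omega

lemma bLoop_at_match (cs : List Char) (m : Nat) (hPA : PA cs m) :
    bLoop cs m = [(m : Int), (aInner cs m : Int)] :: bLoop cs (aInner cs m) := by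
  have hm : m < cs.length := PA_lt cs m hPA
  rw [bLoop]
  simp only [hm, dif_pos]
  rw [dif_pos ((bLoop_guard_iff cs m).mpr hPA)]
  rw [bExtend_eq_aInner]

lemma aLoop_eq_bLoop (cs : List Char) (loc : Nat) (h : loc ≤ cs.length)
    (acc : List (List Int)) : aLoop cs loc h acc = acc ++ bLoop cs loc := by
  fun_induction aLoop cs loc h acc with
  | case1 loc h acc hs =>
    rw [bLoop_none cs loc]
    · simp
    · intro i hi hPA
      have hi' : i < cs.length := PA_lt cs i hPA
      exact (by
        obtain hnone1 := (findFrom_none_iff cs "https://".toList loc h).mp hs.1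
        obtain hnone2 := (findFrom_none_iff cs "http://".toList loc h).mp hs.2
        rcases hPA with hp | hp
        · exact hnone2 i hi hp
        · exact hnone1 i hi hp)
  | case2 loc h acc hs first second ih =>
    obtain ⟨m, hm, hlm, hPA, hmin⟩ := aFirst_spec cs loc h hs
    rw [ih]
    have hskip : bLoop cs loc = bLoop cs m :=
      bLoop_skip_to cs loc m hlm (by have := PA_lt cs m hPA; omega) hmin
    rw [hskip, bLoop_at_match cs m hPA]
    have e1 : first = (m : Int) := hm
    have e2 : second = aInner cs m := by
      show aInner cs first.toNat = aInner cs m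
      rw [e1]
      norm_num
    rw [e1, e2]
    simp

-- ===== VERDICT (by name: the statement is the Claim_ definition above) =====
theorem hyperlink_range_spec : Claim_equal_hyperlink_range := by
  intro text _
  unfold Spec_hyperlink_range hyperlink_range hyperlink_range_alt
  exact aLoop_eq_bLoop text.toList 0 (by omega) []
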